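-- pv_equiv track=rewrite | github.com/JmacCl/MSCIActiveInferenceProject | Model/GridWorld/GridWorldEnv.py | set_up_boundary_modalities
-- ===== SOURCE A (Python) =====
-- from typing import List, Tuple
--
-- def set_up_boundary_modalities(free_space: List[Tuple[int, int]]):
--     """
--     Map each possible location with its boundary observation modality
--     :param free_space: the list of grid locations where the agent can move
--     :return: A dictionary that maps each location to its boundary observation
--     """
--
--     state_boundary_map = {}
--
--     boundary_mod = {
--         "None": 0,
--         "Left_Wall": 1,
--         "Right_Wall": 2,
--         "Up_Wall": 3,
--         "Bottom_Wall": 4,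
--         "Up_Left_Corner": 5,
--         "Up_Right_Corner": 6,
--         "Bottom_Left_Corner": 7,
--         "Bottom_Right_Corner": 8,
--         "Horizontal_Corider": 9,
--         "Vertical_Corider": 10,
--         "Top_Enclosure": 11,
--         "Bottom_Enclosure": 12,
--         "Left_Enclosure": 13,
--         "Right_Enclosure": 14,
--     }
--     # Assumes for each environment that the outer boundaries are always free
--
--     for y, x in free_space:
--         up = (y - 1, x) in free_space
--         down = (y + 1, x) in free_space
--         left = (y, x - 1) in free_space
--         right = (y, x + 1) in free_space
--
--         if down and not (up or left or right):
--             state_boundary_map[(y, x)] = boundary_mod["Top_Enclosure"]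
--         elif up and not (down or left or right):
--             state_boundary_map[(y, x)] = boundary_mod["Bottom_Enclosure"]
--         elif left and not (down or up or right):
--             state_boundary_map[(y, x)] = boundary_mod["Right_Enclosure"]
--         elif right and not (down or left or up):
--             state_boundary_map[(y, x)] = boundary_mod["Left_Enclosure"]
--         elif left and right and not (down or up):
--             state_boundary_map[(y, x)] = boundary_mod["Horizontal_Corider"]
--         elif up and down and not (left or right):
--             state_boundary_map[(y, x)] = boundary_mod["Vertical_Corider"]
--         elif not (up or left) and (down and right):
--             state_boundary_map[(y, x)] = boundary_mod["Up_Left_Corner"]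
--         elif not (up or right) and (down and left):
--             state_boundary_map[(y, x)] = boundary_mod["Up_Right_Corner"]
--         elif not (down or right) and (up and left):
--             state_boundary_map[(y, x)] = boundary_mod["Bottom_Right_Corner"]
--         elif not (down or left) and (up and right):
--             state_boundary_map[(y, x)] = boundary_mod["Bottom_Left_Corner"]
--         elif not down and (up and left and right):
--             state_boundary_map[(y, x)] = boundary_mod["Bottom_Wall"]
--         elif not up and (down and left and right):
--             state_boundary_map[(y, x)] = boundary_mod["Up_Wall"]
--         elif not right and (down and left and up):
--             state_boundary_map[(y, x)] = boundary_mod["Right_Wall"]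
--         elif not left and (down and right and up):
--             state_boundary_map[(y, x)] = boundary_mod["Left_Wall"]
--         else:
--             state_boundary_map[(y, x)] = boundary_mod["None"]
--
--     return state_boundary_map
-- ===== SOURCE B (Python) =====
-- from typing import List, Tuple
--
-- # modality indexed by bitmask 8*up + 4*down + 2*left + right
-- _CODES = [0, 13, 14, 9, 11, 5, 6, 3, 12, 7, 8, 4, 10, 1, 2, 0]
--
-- def set_up_boundary_modalities(free_space: List[Tuple[int, int]]):
--     # Staged passes: shift the whole free space once per direction, so each
--     # point's neighbour tests become set-membership in a precomputed shifted set.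
--     has_up = {(y + 1, x) for y, x in free_space}
--     has_down = {(y - 1, x) for y, x in free_space}
--     has_left = {(y, x + 1) for y, x in free_space}
--     has_right = {(y, x - 1) for y, x in free_space}
--     return {p: _CODES[8 * (p in has_up) + 4 * (p in has_down)
--                       + 2 * (p in has_left) + (p in has_right)]
--             for p in free_space}
-- ===== Notes on version B (the rewrite author's own statement) =====
-- stated objective: faster
-- what changed: Instead of scanning the list four times per cell and a 14-way if/elif cascade, B precomputes four direction-shifted hash sets of the whole free space in staged passes and assigns each cell a code from a 16-entry list indexed by the 4-bit neighbour mask.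
import Mathlib
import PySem

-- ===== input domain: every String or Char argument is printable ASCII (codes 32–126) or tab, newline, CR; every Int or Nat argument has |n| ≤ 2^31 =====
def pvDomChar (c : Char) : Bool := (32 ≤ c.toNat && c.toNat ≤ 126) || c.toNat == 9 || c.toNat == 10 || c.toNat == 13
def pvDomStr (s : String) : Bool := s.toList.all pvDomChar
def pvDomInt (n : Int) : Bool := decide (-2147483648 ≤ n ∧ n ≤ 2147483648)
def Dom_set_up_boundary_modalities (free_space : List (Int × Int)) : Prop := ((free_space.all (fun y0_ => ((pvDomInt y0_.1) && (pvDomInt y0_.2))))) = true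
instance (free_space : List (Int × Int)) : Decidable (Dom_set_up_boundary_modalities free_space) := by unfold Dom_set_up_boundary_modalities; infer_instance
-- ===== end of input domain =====

-- B replaces A's per-cell four membership scans + 14-way if/elif cascade by four precomputed
-- shifted neighbour sets and a 16-entry code list indexed by a bitmask (objective: alternative).
-- Both programs return a dict keyed by (y, x); rendered here as List (Int × Int × Int) in insertion order.

-- ===== PORT A =====
def set_up_boundary_modalities (free_space : List (Int × Int)) : List (Int × Int × Int) :=
  (free_space.foldl (fun (d : PySem.Dict (Int × Int) Int) p =>
      let y := p.1
      let x := p.2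
      let up := free_space.contains (y - 1, x)
      let down := free_space.contains (y + 1, x)
      let left := free_space.contains (y, x - 1)
      let right := free_space.contains (y, x + 1)
      d.insert (y, x)
        (if down && !(up || left || right) then 11
         else if up && !(down || left || right) then 12
         else if left && !(down || up || right) then 14
         else if right && !(down || left || up) then 13
         else if left && right && !(down || up) then 9
         else if up && down && !(left || right) then 10
         else if !(up || left) && (down && right) then 5
         else if !(up || right) && (down && left) then 6
         else if !(down || right) && (up && left) then 8
         else if !(down || left) && (up && right) then 7
         else if !down && (up && left && right) then 4
         else if !up && (down && left && right) then 3
         else if !right && (down && left && up) then 2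
         else if !left && (down && right && up) then 1
         else 0)) PySem.Dict.empty).items.map (fun kv => (kv.1.1, kv.1.2, kv.2))

-- ===== PORT B =====
-- modality indexed by bitmask 8*up + 4*down + 2*left + right
def pvCodes : List Int := [0, 13, 14, 9, 11, 5, 6, 3, 12, 7, 8, 4, 10, 1, 2, 0]

def set_up_boundary_modalities_alt (free_space : List (Int × Int)) : List (Int × Int × Int) :=
  let has_up : PySem.Set (Int × Int) := PySem.Set.ofList (free_space.map (fun q => (q.1 + 1, q.2)))
  let has_down : PySem.Set (Int × Int) := PySem.Set.ofList (free_space.map (fun q => (q.1 - 1, q.2)))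
  let has_left : PySem.Set (Int × Int) := PySem.Set.ofList (free_space.map (fun q => (q.1, q.2 + 1)))
  let has_right : PySem.Set (Int × Int) := PySem.Set.ofList (free_space.map (fun q => (q.1, q.2 - 1)))
  (free_space.foldl (fun (d : PySem.Dict (Int × Int) Int) p =>
      d.insert p
        (PySem.List.pyGetD pvCodes
          (8 * (if PySem.Set.contains has_up p then (1 : Int) else 0)
           + 4 * (if PySem.Set.contains has_down p then (1 : Int) else 0)
           + 2 * (if PySem.Set.contains has_left p then (1 : Int) else 0)
           + (if PySem.Set.contains has_right p then (1 : Int) else 0)) 0))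
    PySem.Dict.empty).items.map (fun kv => (kv.1.1, kv.1.2, kv.2))

-- ===== PRECONDITION & SPEC =====
def Spec_set_up_boundary_modalities (free_space : List (Int × Int)) (out : List (Int × Int × Int)) : Prop := out = set_up_boundary_modalities_alt free_space
instance (free_space : List (Int × Int)) (out : List (Int × Int × Int)) : Decidable (Spec_set_up_boundary_modalities free_space out) := by unfold Spec_set_up_boundary_modalities; infer_instance

-- ===== CLAIM (what is proved, stated in full; the proofs are below) =====
def Claim_equal_set_up_boundary_modalities : Prop := ∀ (free_space : List (Int × Int)), Dom_set_up_boundary_modalities free_space → Spec_set_up_boundary_modalities free_space (set_up_boundary_modalities free_space)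

-- ===== LEMMAS AND PROOFS =====

-- a point is in the Set built from an injectively shifted copy of the list
-- iff its unique preimage under the shift is in the list
theorem pvSetMem (fs : List (Int × Int)) (f : Int × Int → Int × Int) (p q0 : Int × Int)
    (h : ∀ q, f q = p ↔ q = q0) :
    (PySem.Set.ofList (fs.map f)).contains p = fs.contains q0 := by
  rw [Bool.eq_iff_iff]
  simp only [PySem.Set.contains, List.contains_iff_mem, PySem.Set.mem_ofList, List.mem_map]
  constructor
  · rintro ⟨q, hq, hf⟩
    rwa [(h q).1 hf] at hq
  · intro hq
    exact ⟨q0, hq, (h q0).2 rfl⟩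

theorem pvUpMem (fs : List (Int × Int)) (p : Int × Int) :
    (PySem.Set.ofList (fs.map (fun q => (q.1 + 1, q.2)))).contains p = fs.contains (p.1 - 1, p.2) :=
  pvSetMem fs _ p _ (fun q => by simp [Prod.ext_iff]; omega)

theorem pvDownMem (fs : List (Int × Int)) (p : Int × Int) :
    (PySem.Set.ofList (fs.map (fun q => (q.1 - 1, q.2)))).contains p = fs.contains (p.1 + 1, p.2) :=
  pvSetMem fs _ p _ (fun q => by simp [Prod.ext_iff]; omega)

theorem pvLeftMem (fs : List (Int × Int)) (p : Int × Int) :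
    (PySem.Set.ofList (fs.map (fun q => (q.1, q.2 + 1)))).contains p = fs.contains (p.1, p.2 - 1) :=
  pvSetMem fs _ p _ (fun q => by simp [Prod.ext_iff]; omega)

theorem pvRightMem (fs : List (Int × Int)) (p : Int × Int) :
    (PySem.Set.ofList (fs.map (fun q => (q.1, q.2 - 1)))).contains p = fs.contains (p.1, p.2 + 1) :=
  pvSetMem fs _ p _ (fun q => by simp [Prod.ext_iff]; omega)

-- A's 14-branch cascade and B's bitmask code lookup agree on all 16 boolean quadruples
theorem pvMod_eq (up down left right : Bool) :
    (if down && !(up || left || right) then (11 : Int)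
     else if up && !(down || left || right) then 12
     else if left && !(down || up || right) then 14
     else if right && !(down || left || up) then 13
     else if left && right && !(down || up) then 9
     else if up && down && !(left || right) then 10
     else if !(up || left) && (down && right) then 5
     else if !(up || right) && (down && left) then 6
     else if !(down || right) && (up && left) then 8
     else if !(down || left) && (up && right) then 7
     else if !down && (up && left && right) then 4
     else if !up && (down && left && right) then 3
     else if !right && (down && left && up) then 2
     else if !left && (down && right && up) then 1
     else 0)
    = PySem.List.pyGetD pvCodes
        (8 * (if up then (1 : Int) else 0) + 4 * (if down then (1 : Int) else 0)
         + 2 * (if left then (1 : Int) else 0) + (if right then (1 : Int) else 0)) 0 := by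
  revert up down left right; decide

-- ===== VERDICT (by name: the statement is the Claim_ definition above) =====
theorem set_up_boundary_modalities_spec : Claim_equal_set_up_boundary_modalities := by
  intro free_space _
  unfold Spec_set_up_boundary_modalities set_up_boundary_modalities set_up_boundary_modalities_alt
  refine congrArg (List.map _) (congrArg PySem.Dict.items ?_)
  refine congrFun (congrFun (congrArg List.foldl (funext fun d => funext fun p => ?_)) _) _
  simp only
  rw [pvMod_eq, pvUpMem, pvDownMem, pvLeftMem, pvRightMem]
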